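-- pv_equiv track=rewrite | github.com/michaeljgallagher/Advent-of-Code | 2022/24.py | precompute_blizzards
-- ===== SOURCE A (Python) =====
-- from math import lcm
--
-- def precompute_blizzards(blizzards, h, w):
--     inner_h = h - 2
--     inner_w = w - 2
--     cycle = lcm(inner_h, inner_w)
--     cache = {}
--     for t in range(cycle):
--         pos = set()
--         for i, j, d in blizzards:
--             if d == "^":
--                 ni = ((i - 1 - t) % inner_h) + 1
--                 nj = j
--             elif d == "v":
--                 ni = ((i - 1 + t) % inner_h) + 1
--                 nj = j
--             elif d == "<":
--                 ni = i
--                 nj = ((j - 1 - t) % inner_w) + 1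
--             elif d == ">":
--                 ni = i
--                 nj = ((j - 1 + t) % inner_w) + 1
--             pos.add((ni, nj))
--         cache[t] = pos
--     return cache, cycle
-- ===== SOURCE B (Python) =====
-- from math import lcm
--
--
-- def precompute_blizzards(blizzards, h, w):
--     inner_h = h - 2
--     inner_w = w - 2
--     cycle = lcm(inner_h, inner_w)
--     if cycle == 0:
--         return {}, cycle
--     # normalize starting positions into the inner grid, then step forward
--     cur = []
--     for i, j, d in blizzards:
--         if d == "^" or d == "v":
--             cur.append(((i - 1) % inner_h + 1, j, d))
--         elif d == "<" or d == ">":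
--             cur.append((i, (j - 1) % inner_w + 1, d))
--         else:
--             raise ValueError("unknown blizzard direction: " + d)
--     cache = {}
--     for t in range(cycle):
--         cache[t] = {(i, j) for i, j, _ in cur}
--         nxt = []
--         for i, j, d in cur:
--             if d == "^":
--                 i = (i - 2) % inner_h + 1
--             elif d == "v":
--                 i = i % inner_h + 1
--             elif d == "<":
--                 j = (j - 2) % inner_w + 1
--             else:
--                 j = j % inner_w + 1
--             nxt.append((i, j, d))
--         cur = nxt
--     return cache, cycle
-- ===== Notes on version B (the rewrite author's own statement) =====
-- stated objective: alternative
-- what changed: Instead of recomputing every blizzard's position from its original coordinates with a closed-form modulo in t for each time step, B normalizes the blizzards into the inner grid once and then carries the whole fleet forward one wraparound step per tick, recording the current position set before each advance.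
import Mathlib
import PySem

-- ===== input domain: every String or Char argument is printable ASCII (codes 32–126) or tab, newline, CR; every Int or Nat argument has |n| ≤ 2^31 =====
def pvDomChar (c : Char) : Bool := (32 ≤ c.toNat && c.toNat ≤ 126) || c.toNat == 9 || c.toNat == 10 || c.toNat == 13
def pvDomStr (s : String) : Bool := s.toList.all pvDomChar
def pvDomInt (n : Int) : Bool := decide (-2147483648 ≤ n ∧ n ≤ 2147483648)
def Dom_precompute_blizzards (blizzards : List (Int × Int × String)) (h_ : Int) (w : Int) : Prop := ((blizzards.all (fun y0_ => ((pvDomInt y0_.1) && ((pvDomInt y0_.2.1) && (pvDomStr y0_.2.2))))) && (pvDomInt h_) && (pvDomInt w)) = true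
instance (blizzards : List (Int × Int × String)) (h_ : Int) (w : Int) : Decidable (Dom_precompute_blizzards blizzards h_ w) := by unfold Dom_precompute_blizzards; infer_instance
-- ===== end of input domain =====

-- B replaces A's per-time closed-form modulo recomputation by normalizing the blizzards once and
-- carrying them forward one step per tick (alternative decomposition; same asymptotic cost).


-- ===== PORT A =====
-- body of A's inner loop: the new (ni, nj) for one blizzard at time t; `last` is the leftover
-- (ni, nj) Python keeps from the previous iteration when no branch matches (UnboundLocalError
-- if there was none; such inputs are outside Pre_).
def pbPosA (inner_h inner_w t : Int) (last : Int × Int) (b : Int × Int × String) : Int × Int :=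
  if b.2.2 = "^" then (PySem.Int.mod (b.1 - 1 - t) inner_h + 1, b.2.1)
  else if b.2.2 = "v" then (PySem.Int.mod (b.1 - 1 + t) inner_h + 1, b.2.1)
  else if b.2.2 = "<" then (b.1, PySem.Int.mod (b.2.1 - 1 - t) inner_w + 1)
  else if b.2.2 = ">" then (b.1, PySem.Int.mod (b.2.1 - 1 + t) inner_w + 1)
  else last

-- A's inner loop: build the set `pos` for one t (state = (pos, leftover (ni, nj)))
def pbInnerA (inner_h inner_w t : Int) (blizzards : List (Int × Int × String)) : List (Int × Int) :=
  (blizzards.foldl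
    (fun (st : PySem.Set (Int × Int) × (Int × Int)) b =>
      let nij := pbPosA inner_h inner_w t st.2 b
      (PySem.Set.add st.1 nij, nij))
    (PySem.Set.empty, (0, 0))).1

-- A's outer loop: cache[t] = pos for each t (the dict is an insertion-ordered assoc list)
def pbLoopA (inner_h inner_w : Int) (blizzards : List (Int × Int × String))
    (ts : List Int) (acc : List (Int × List (Int × Int))) : List (Int × List (Int × Int)) :=
  ts.foldl (fun acc t => acc ++ [(t, pbInnerA inner_h inner_w t blizzards)]) acc

def precompute_blizzards (blizzards : List (Int × Int × String)) (h_ : Int) (w : Int) : (List (Int × List (Int × Int))) × Int :=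
  let inner_h := h_ - 2
  let inner_w := w - 2
  let cycle : Int := (Int.lcm inner_h inner_w : Int)  -- math.lcm: nonnegative
  (pbLoopA inner_h inner_w blizzards (PySem.List.pyRange 0 cycle 1) [], cycle)

-- ===== PORT B =====
-- Source B's normalization of one starting blizzard (Source B raises ValueError in the final branch;
-- such inputs are outside Pre_)
def pbNormB (inner_h inner_w : Int) (b : Int × Int × String) : Int × Int × String :=
  if b.2.2 = "^" ∨ b.2.2 = "v" then (PySem.Int.mod (b.1 - 1) inner_h + 1, b.2.1, b.2.2)
  else if b.2.2 = "<" ∨ b.2.2 = ">" then (b.1, PySem.Int.mod (b.2.1 - 1) inner_w + 1, b.2.2)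
  else b

-- Source B's one-tick advance of one blizzard
def pbStepB (inner_h inner_w : Int) (b : Int × Int × String) : Int × Int × String :=
  if b.2.2 = "^" then (PySem.Int.mod (b.1 - 2) inner_h + 1, b.2.1, b.2.2)
  else if b.2.2 = "v" then (PySem.Int.mod b.1 inner_h + 1, b.2.1, b.2.2)
  else if b.2.2 = "<" then (b.1, PySem.Int.mod (b.2.1 - 2) inner_w + 1, b.2.2)
  else (b.1, PySem.Int.mod b.2.1 inner_w + 1, b.2.2)

-- Source B's main loop: record the current positions as a set, then advance every blizzard
def pbLoopB (inner_h inner_w : Int) (ts : List Int)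
    (st : List (Int × List (Int × Int)) × List (Int × Int × String)) :
    List (Int × List (Int × Int)) × List (Int × Int × String) :=
  ts.foldl
    (fun st t =>
      (st.1 ++ [(t, PySem.Set.ofList (st.2.map (fun b => (b.1, b.2.1))))],
       st.2.map (pbStepB inner_h inner_w)))
    st

def precompute_blizzards_alt (blizzards : List (Int × Int × String)) (h_ : Int) (w : Int) : (List (Int × List (Int × Int))) × Int :=
  let inner_h := h_ - 2
  let inner_w := w - 2
  let cycle : Int := (Int.lcm inner_h inner_w : Int)
  if cycle = 0 then ([], cycle)
  else
    let cur := blizzards.map (pbNormB inner_h inner_w)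
    ((pbLoopB inner_h inner_w (PySem.List.pyRange 0 cycle 1) ([], cur)).1, cycle)

-- ===== PRECONDITION & SPEC =====
-- Pre_ excludes inputs on which the time loop runs (both inner dimensions nonzero) while some
-- blizzard's direction is not one of "^" "v" "<" ">": there A raises UnboundLocalError if the
-- offender comes first and otherwise returns a position reused from leftover loop state, while
-- B raises ValueError.
def Pre_precompute_blizzards (blizzards : List (Int × Int × String)) (h_ : Int) (w : Int) : Prop :=
  (h_ - 2) * (w - 2) = 0 ∨
    ∀ b ∈ blizzards, b.2.2 = "^" ∨ b.2.2 = "v" ∨ b.2.2 = "<" ∨ b.2.2 = ">"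
instance (blizzards : List (Int × Int × String)) (h_ : Int) (w : Int) : Decidable (Pre_precompute_blizzards blizzards h_ w) := by unfold Pre_precompute_blizzards; infer_instance

def pvWitness_precompute_blizzards : (List (Int × Int × String)) × Int × Int :=
  ([(1, 1, ">"), (2, 2, "^")], 4, 5)

def Spec_precompute_blizzards (blizzards : List (Int × Int × String)) (h_ : Int) (w : Int) (out : (List (Int × List (Int × Int))) × Int) : Prop := out = precompute_blizzards_alt blizzards h_ w
instance (blizzards : List (Int × Int × String)) (h_ : Int) (w : Int) (out : (List (Int × List (Int × Int))) × Int) : Decidable (Spec_precompute_blizzards blizzards h_ w out) := by unfold Spec_precompute_blizzards; infer_instance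

-- ===== CLAIM (what is proved, stated in full; the proofs are below) =====
def Claim_equal_precompute_blizzards : Prop := ∀ (blizzards : List (Int × Int × String)) (h_ : Int) (w : Int), Dom_precompute_blizzards blizzards h_ w → Pre_precompute_blizzards blizzards h_ w → Spec_precompute_blizzards blizzards h_ w (precompute_blizzards blizzards h_ w)

-- ===== LEMMAS AND PROOFS =====

-- a blizzard with a recognised direction
def pbValid (b : Int × Int × String) : Prop :=
  b.2.2 = "^" ∨ b.2.2 = "v" ∨ b.2.2 = "<" ∨ b.2.2 = ">"

-- closed form: one blizzard advanced t steps (A's formula, with the direction kept)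
def pbAdv (inner_h inner_w t : Int) (b : Int × Int × String) : Int × Int × String :=
  if b.2.2 = "^" then ((b.1 - 1 - t).fmod inner_h + 1, b.2.1, b.2.2)
  else if b.2.2 = "v" then ((b.1 - 1 + t).fmod inner_h + 1, b.2.1, b.2.2)
  else if b.2.2 = "<" then (b.1, (b.2.1 - 1 - t).fmod inner_w + 1, b.2.2)
  else (b.1, (b.2.1 - 1 + t).fmod inner_w + 1, b.2.2)

lemma pbNormB_eq_adv (H W : Int) (b : Int × Int × String) (hb : pbValid b) :
    pbNormB H W b = pbAdv H W 0 b := by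
  obtain ⟨i, j, d⟩ := b
  rcases hb with h | h | h | h <;> subst h <;>
    simp [pbNormB, pbAdv, PySem.Int.mod]

lemma pbStepB_adv (H W t : Int) (b : Int × Int × String) (hb : pbValid b) :
    pbStepB H W (pbAdv H W t b) = pbAdv H W (t + 1) b := by
  obtain ⟨i, j, d⟩ := b
  have key : ∀ a c M : Int, (a.fmod M + c).fmod M = (a + c).fmod M :=
    fun a c M => Int.fmod_add_fmod a M c
  rcases hb with h | h | h | h <;> subst h <;>
    simp [pbStepB, pbAdv, PySem.Int.mod]
  · rw [show (i - 1 - t).fmod H + 1 - 2 = (i - 1 - t).fmod H + (-1) from by ring, key]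
    congr 1; ring
  · congr 1; ring
  · rw [show (j - 1 - t).fmod W + 1 - 2 = (j - 1 - t).fmod W + (-1) from by ring, key]
    congr 1; ring
  · congr 1; ring

lemma pbPosA_eq_adv (H W t : Int) (z : Int × Int) (b : Int × Int × String) (hb : pbValid b) :
    pbPosA H W t z b = ((pbAdv H W t b).1, (pbAdv H W t b).2.1) := by
  obtain ⟨i, j, d⟩ := b
  rcases hb with h | h | h | h <;> subst h <;>
    simp [pbPosA, pbAdv, PySem.Int.mod]

-- A's inner fold builds exactly set() of the advanced positions, in list order
lemma pbInnerA_fold (H W t : Int) :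
    ∀ (l : List (Int × Int × String)) (s : PySem.Set (Int × Int)) (z : Int × Int),
      (∀ b ∈ l, pbValid b) →
      (l.foldl
        (fun (st : PySem.Set (Int × Int) × (Int × Int)) b =>
          let nij := pbPosA H W t st.2 b
          (PySem.Set.add st.1 nij, nij)) (s, z)).1
      = l.foldl (fun s b => PySem.Set.add s ((pbAdv H W t b).1, (pbAdv H W t b).2.1)) s := by
  intro l
  induction l with
  | nil => intro s z _; rfl
  | cons b l ih =>
    intro s z hv
    simp only [List.foldl_cons]
    rw [pbPosA_eq_adv H W t z b (hv b (by simp))]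
    exact ih _ _ (fun x hx => hv x (by simp [hx]))

lemma pbInnerA_eq (H W t : Int) (bl : List (Int × Int × String)) (hv : ∀ b ∈ bl, pbValid b) :
    pbInnerA H W t bl
      = PySem.Set.ofList ((bl.map (pbAdv H W t)).map (fun b => (b.1, b.2.1))) := by
  rw [pbInnerA, pbInnerA_fold H W t bl _ _ hv, PySem.Set.ofList_eq_foldl,
    List.foldl_map, List.foldl_map]
  rfl

-- the main step-vs-closed-form induction over a consecutive range of times
lemma pbLoop_eq (H W : Int) (bl : List (Int × Int × String))
    (hv : ∀ b ∈ bl, pbValid b) :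
    ∀ (k : Nat) (t0 : Int) (acc : List (Int × List (Int × Int))),
      pbLoopB H W (PySem.List.pyRange t0 (t0 + k) 1) (acc, bl.map (pbAdv H W t0))
        = (pbLoopA H W bl (PySem.List.pyRange t0 (t0 + k) 1) acc, bl.map (pbAdv H W (t0 + k))) := by
  intro k
  induction k with
  | zero =>
    intro t0 acc
    rw [show t0 + (0 : Nat) = t0 by simp]
    rw [PySem.List.pyRange_one_eq_nil le_rfl]
    rfl
  | succ k ih =>
    intro t0 acc
    rw [PySem.List.pyRange_one_cons (by push_cast; omega)]
    simp only [pbLoopA, pbLoopB, List.foldl_cons]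
    have hstep : (bl.map (pbAdv H W t0)).map (pbStepB H W) = bl.map (pbAdv H W (t0 + 1)) := by
      rw [List.map_map]
      exact List.map_congr_left (fun b hb => pbStepB_adv H W t0 b (hv b hb))
    rw [hstep, ← pbInnerA_eq H W t0 bl hv]
    have := ih (t0 + 1) (acc ++ [(t0, pbInnerA H W t0 bl)])
    simp only [pbLoopA, pbLoopB] at this
    rw [show t0 + 1 + (k : Int) = t0 + ((k : Nat) + 1 : Nat) by push_cast; ring] at this
    exact this

-- ===== VERDICT (by name: the statement is the Claim_ definition above) =====
theorem precompute_blizzards_spec : Claim_equal_precompute_blizzards := by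
  intro bl h_ w _ hpre
  unfold Spec_precompute_blizzards precompute_blizzards precompute_blizzards_alt
  set H := h_ - 2 with hH
  set W := w - 2 with hW
  by_cases hc : Int.lcm H W = 0
  · simp [hc, PySem.List.pyRange_one_eq_nil, pbLoopA]
  · have hc' : ((Int.lcm H W : Nat) : Int) ≠ 0 := by exact_mod_cast hc
    have hHW : H ≠ 0 ∧ W ≠ 0 := by
      constructor <;> intro h0 <;> exact hc (by simp [h0])
    have hv : ∀ b ∈ bl, pbValid b := by
      rcases hpre with h | h
      · exact absurd (mul_eq_zero.mp h) (by rintro (h | h) <;> [exact hHW.1 h; exact hHW.2 h])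
      · exact h
    simp only [hc', if_false]
    have hcur : bl.map (pbNormB H W) = bl.map (pbAdv H W 0) :=
      List.map_congr_left (fun b hb => pbNormB_eq_adv H W b (hv b hb))
    have := pbLoop_eq H W bl hv (Int.lcm H W) 0 []
    rw [zero_add] at this
    rw [hcur, this]
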